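-- pv_equiv track=rewrite | github.com/angadsinghsandhu/Notes | Leetcode/Solutions/14_Dynamic_Programming/4_Kadane_countBits.py | eff_base_approach
-- ===== SOURCE A (Python) =====
-- def eff_base_approach(n):
--     res = []
--
--     for i in range(n+1):
--         count = 0
--         while i:
--             count += 1
--             # using hamming code
--             i = i & (i-1)
--
--         res.append(count)
--
--     return res
-- ===== SOURCE B (Python) =====
-- def eff_base_approach(n):
--     # O(n) block-doubling DP: bit counts of [2**k, 2**(k+1)) are those of [0, 2**k) plus one
--     res = [0]
--     while len(res) <= n:
--         res += [c + 1 for c in res]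
--     return res[:n + 1]
-- ===== Notes on version B (the rewrite author's own statement) =====
-- stated objective: faster
-- what changed: Replaces A's per-number Kernighan loop (repeatedly clearing the lowest set bit of every integer up to n) by a block-doubling DP that builds the whole table in one pass: each doubling of the table appends the existing counts each incremented by one.
import Mathlib
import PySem

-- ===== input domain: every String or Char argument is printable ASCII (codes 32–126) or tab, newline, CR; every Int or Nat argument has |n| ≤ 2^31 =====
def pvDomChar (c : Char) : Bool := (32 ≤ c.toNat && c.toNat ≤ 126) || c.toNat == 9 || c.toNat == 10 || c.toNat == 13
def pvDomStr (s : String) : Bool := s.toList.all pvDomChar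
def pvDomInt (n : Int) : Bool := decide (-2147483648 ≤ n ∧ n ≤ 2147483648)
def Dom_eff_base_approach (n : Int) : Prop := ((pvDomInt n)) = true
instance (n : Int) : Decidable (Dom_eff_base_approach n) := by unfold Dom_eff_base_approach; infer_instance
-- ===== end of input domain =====

-- B replaces A's per-number Kernighan bit-clearing loop (O(n log n)) by an O(n) block-doubling DP; return values agree for every n.

-- ===== PORT A =====
-- termination helper for the inner `while i:` loop: i & (i-1) clears a set bit, so it shrinks
theorem pvBandPredLt (i : Int) (h : 0 < i) : (PySem.Int.band i (i-1)).toNat < i.toNat := by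
  have hm : i = ((i.toNat : Nat) : Int) := by omega
  rw [hm]
  cases hn : i.toNat with
  | zero => omega
  | succ k =>
    have h1 : ((k+1 : Nat) : Int) - 1 = ((k : Nat) : Int) := by push_cast; ring
    rw [h1, PySem.Int.band_natCast]
    have : (k+1) &&& k ≤ k := Nat.and_le_right
    simpa using by omega

-- inner loop of A: count = 0; while i: count += 1; i = i & (i-1)
-- (i comes from range(0, n+1) so it is nonnegative; the guard `0 < i` is Python's `while i:` there)
def countA (i : Int) : Int :=
  if h : 0 < i then 1 + countA (PySem.Int.band i (i-1)) else 0
termination_by i.toNat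
decreasing_by exact pvBandPredLt i h

def eff_base_approach (n : Int) : List Int :=
  (PySem.List.pyRange 0 (n+1) 1).foldl (fun res i => res ++ [countA i]) []

-- ===== PORT B =====
-- B's while loop: res = [0]; while len(res) <= n: res += [c + 1 for c in res]
-- (`res ≠ []` in the guard only makes the recursion total; res starts at [0] and only grows)
def growB (n : Int) (res : List Int) : List Int :=
  if h : (res.length : Int) ≤ n ∧ res ≠ [] then
    growB n (res ++ res.map (· + 1))
  else res
termination_by (n + 1 - res.length).toNat
decreasing_by
  simp only [List.length_append, List.length_map, List.length_attach]
  have h2 : 1 ≤ res.length := List.length_pos_iff.mpr h.2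
  omega

def eff_base_approach_alt (n : Int) : List Int :=
  PySem.List.slice (growB n [0]) none (some (n+1))

-- ===== PRECONDITION & SPEC =====
def Spec_eff_base_approach (n : Int) (out : List Int) : Prop := out = eff_base_approach_alt n
instance (n : Int) (out : List Int) : Decidable (Spec_eff_base_approach n out) := by unfold Spec_eff_base_approach; infer_instance

-- ===== CLAIM (what is proved, stated in full; the proofs are below) =====
def Claim_equal_eff_base_approach : Prop := ∀ (n : Int), Dom_eff_base_approach n → Spec_eff_base_approach n (eff_base_approach n)

-- ===== LEMMAS AND PROOFS =====

-- popcount spec both sides are compared against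
def pc (m : Nat) : Nat := PySem.Int.bitCount (m : Int)

theorem pc_half (j : Nat) : pc j = j % 2 + pc (j / 2) := by
  cases j with
  | zero => simp [pc]
  | succ k => exact PySem.Int.bitCount_natCast (m := k+1) (by omega)

theorem pc_two_mul (q : Nat) : pc (2*q) = pc q := by
  have h2 : 2*q/2 = q := by omega
  rw [pc_half, Nat.mul_mod_right, h2]; omega

theorem pc_two_mul_add_one (q : Nat) : pc (2*q+1) = pc q + 1 := by
  have h1 : (2*q+1) % 2 = 1 := by omega
  have h2 : (2*q+1) / 2 = q := by omega
  rw [pc_half (2*q+1), h1, h2]; omega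

-- the two Kernighan step identities, at bit level
theorem bitw_self (q : Nat) : Nat.bitwise and q q = q := by
  have : q &&& q = q := by simp
  simpa [HAnd.hAnd, AndOp.and, Nat.land] using this

theorem land_odd (q : Nat) : (2*q+1) &&& (2*q) = 2*q := by
  have := Nat.bitwise_bit (f := and) (a := true) (m := q) (b := false) (n := q)
  simpa [Nat.bit, HAnd.hAnd, AndOp.and, Nat.land, bitw_self] using this

theorem land_even (q : Nat) (h : 0 < q) : (2*q) &&& (2*q-1) = 2*(q &&& (q-1)) := by
  have h2 : 2*q - 1 = Nat.bit true (q-1) := by simp [Nat.bit]; omega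
  have := Nat.bitwise_bit (f := and) (a := false) (m := q) (b := true) (n := q-1)
  rw [h2]; simpa [Nat.bit, HAnd.hAnd, AndOp.and, Nat.land] using this

-- clearing the lowest set bit drops the popcount by one
theorem pc_land_pred (m : Nat) (h : 0 < m) : pc (m &&& (m-1)) + 1 = pc m := by
  rcases Nat.even_or_odd m with ⟨q, hq⟩ | ⟨q, hq⟩
  · have hq' : m = 2*q := by omega
    have hqpos : 0 < q := by omega
    subst hq'
    rw [land_even q hqpos, pc_two_mul, pc_two_mul]
    exact pc_land_pred q hqpos
  · subst hq
    have h1 : 2*q+1-1 = 2*q := by omega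
    rw [h1, land_odd, pc_two_mul, pc_two_mul_add_one]
termination_by m

theorem countA_eq_pc (m : Nat) : countA (m : Int) = (pc m : Int) := by
  cases hm : m with
  | zero => simp [countA, pc]
  | succ k =>
    rw [countA]
    have hpos : (0:Int) < ((k+1 : Nat) : Int) := by positivity
    rw [dif_pos hpos]
    have h1 : ((k+1 : Nat) : Int) - 1 = ((k : Nat) : Int) := by push_cast; ring
    rw [h1, PySem.Int.band_natCast]
    rw [countA_eq_pc ((k+1) &&& k)]
    have h2 : (k+1) &&& ((k+1)-1) = (k+1) &&& k := by simp
    have hp := pc_land_pred (k+1) (by omega)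
    rw [h2] at hp
    omega
termination_by m
decreasing_by
  have : (k+1) &&& k ≤ k := Nat.and_le_right
  omega

-- A computes the popcount table of 0..n
theorem A_char (n : Int) :
    eff_base_approach n = (List.range (n+1).toNat).map (fun j => (pc j : Int)) := by
  unfold eff_base_approach
  rw [PySem.List.foldl_append_singleton_eq_map, PySem.List.pyRange_one, List.map_map]
  simp only [sub_zero, List.nil_append]
  exact List.map_congr_left (fun k _ => by simp [countA_eq_pc k])

-- the doubling invariant of B
def blist (k : Nat) : List Int := (List.range (2^k)).map (fun j => (pc j : Int))

theorem pc_pow_add (k j : Nat) (h : j < 2^k) : pc (2^k + j) = pc j + 1 := by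
  induction k generalizing j with
  | zero =>
    interval_cases j
    decide
  | succ k ih =>
    rw [pc_half (2^(k+1) + j)]
    have hpow : 2^(k+1) = 2 * 2^k := by ring
    have h1 : (2^(k+1) + j) % 2 = j % 2 := by omega
    have h2 : (2^(k+1) + j) / 2 = 2^k + j / 2 := by omega
    rw [h1, h2, ih (j/2) (by omega)]
    rw [pc_half j]; omega

theorem blist_succ (k : Nat) : blist (k+1) = blist k ++ (blist k).map (· + 1) := by
  unfold blist
  rw [show (2:Nat)^(k+1) = 2^k + 2^k from by ring, List.range_add, List.map_append]
  simp only [List.map_map]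
  congr 1
  exact List.map_congr_left (fun j hj => by
    simp only [Function.comp_apply]
    rw [pc_pow_add k j (List.mem_range.mp hj)]
    push_cast; ring)

theorem length_blist (k : Nat) : (blist k).length = 2^k := by simp [blist]

theorem blist_ne_nil (k : Nat) : blist k ≠ [] := by
  intro h
  have hl := length_blist k
  have hp : 0 < 2^k := by positivity
  rw [h] at hl
  simp at hl
  omega

theorem growB_blist (n : Int) (k : Nat) :
    ∃ K, growB n (blist k) = blist K ∧ n < ((2^K : Nat) : Int) := by
  by_cases h : ((blist k).length : Int) ≤ n
  · rw [growB.eq_def, dif_pos ⟨h, blist_ne_nil k⟩, ← blist_succ]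
    exact growB_blist n (k+1)
  · refine ⟨k, ?_, ?_⟩
    · rw [growB.eq_def, dif_neg (by intro hc; exact h hc.1)]
    · rw [length_blist] at h; omega
termination_by (n + 1 - 2^k).toNat
decreasing_by
  rw [length_blist] at h
  push_cast at h
  have h1 : (0:Int) < 2^k := by positivity
  omega

theorem blist_zero : blist 0 = [0] := by decide

-- ===== VERDICT (by name: the statement is the Claim_ definition above) =====
theorem eff_base_approach_spec : Claim_equal_eff_base_approach := by
  intro n _
  unfold Spec_eff_base_approach eff_base_approach_alt
  rw [A_char]
  by_cases hn0 : 0 ≤ n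
  · rw [← blist_zero]
    obtain ⟨K, hK, hn⟩ := growB_blist n 0
    rw [hK]
    have hstop : n + 1 = (((n+1).toNat : Nat) : Int) := by omega
    rw [hstop, PySem.List.slice_to_natCast]
    unfold blist
    rw [← List.map_take, List.take_range]
    have hle : (n+1).toNat ≤ 2^K := by omega
    rw [Nat.min_eq_left hle]
    congr 2
  · rw [growB.eq_def, dif_neg (by simp; omega)]
    have h0 : (n+1).toNat = 0 := by omega
    rw [h0]
    simp only [List.range_zero, List.map_nil]
    by_cases h1 : n = -1
    · subst h1
      rw [show (-1 : Int) + 1 = ((0 : Nat) : Int) from by norm_num, PySem.List.slice_to_natCast]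
      simp
    · rw [show n + 1 = -(((-(n+1)).toNat : Nat) : Int) from by omega,
        PySem.List.slice_to_neg_natCast _ _ (by omega)]
      simp
      omega
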